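-- pv_equiv track=rewrite | github.com/soap117/KEPT | preprocess/generate_data_new.py | split_note_to_paragraph
-- ===== SOURCE A (Python) =====
-- def split_note_to_paragraph(note):
--     result = {}
--     now_paragraph = 'other'
--     for line in note.split('\n'):
--         if line.find(":") >= 0:
--             now_paragraph = line[0:line.find(":")]
--             text = line[line.find(":") + 1:]
--             if not now_paragraph in result:
--                 result[now_paragraph] = []
--             result[now_paragraph].append(text.strip())
--         elif not line.strip():
--             now_paragraph = 'other'
--         else:
--             if not now_paragraph in result:
--                 result[now_paragraph] = []
--             result[now_paragraph].append(line.strip())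
--     for paragraph in result:
--         result[paragraph] = " ".join(result[paragraph])
--     return result
-- ===== SOURCE B (Python) =====
-- def split_note_to_paragraph(note):
--     # run-based segmentation: cut the line list into (key, texts) segments,
--     # then merge segments that share a key.
--
--     def take_content(ls):
--         # longest prefix of plain content lines (no colon, not blank), stripped
--         texts = []
--         while ls and ls[0].find(':') < 0 and ls[0].strip():
--             texts.append(ls[0].strip())
--             ls = ls[1:]
--         return texts, ls
--
--     def segments(ls):
--         segs = []
--         while ls:
--             line, ls = ls[0], ls[1:]
--             c = line.find(':')
--             if c >= 0:
--                 texts, ls = take_content(ls)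
--                 segs.append((line[:c], [line[c + 1:].strip()] + texts))
--             elif line.strip():
--                 texts, ls = take_content(ls)
--                 segs.append(('other', [line.strip()] + texts))
--         return segs
--
--     result = {}
--     for key, texts in segments(note.split('\n')):
--         joined = ' '.join(texts)
--         result[key] = result[key] + ' ' + joined if key in result else joined
--     return result
-- ===== Notes on version B (the rewrite author's own statement) =====
-- stated objective: alternative
-- what changed: B replaces A's flat per-line state machine (now_paragraph state, dict-of-lists accumulation, final join loop) by a run-based segmentation: nested run-consuming loops cut the line list into (key, texts) segments, which a separate merge pass joins per key in first-occurrence order.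
import Mathlib
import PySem

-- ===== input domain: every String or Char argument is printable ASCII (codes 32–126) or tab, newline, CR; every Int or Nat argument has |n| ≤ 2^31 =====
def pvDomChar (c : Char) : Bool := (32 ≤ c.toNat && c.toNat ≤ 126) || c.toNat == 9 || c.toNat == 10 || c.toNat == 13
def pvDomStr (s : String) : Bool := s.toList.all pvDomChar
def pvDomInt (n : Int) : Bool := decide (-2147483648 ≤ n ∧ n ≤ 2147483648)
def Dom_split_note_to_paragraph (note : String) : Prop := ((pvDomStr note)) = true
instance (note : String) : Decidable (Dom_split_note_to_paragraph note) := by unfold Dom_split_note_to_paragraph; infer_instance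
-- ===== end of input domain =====

-- B replaces A's flat per-line state machine (dict of lists + final join loop) by a run-based
-- segmentation: nested run-consuming loops cut the lines into (key, texts) segments, which a
-- separate merge pass joins per key (objective: alternative decomposition, same cost).

-- ===== PORT A =====
-- A's loop body: three branches over (result dict, now_paragraph) state
def pvAStep (st : PySem.Dict (List Char) (List (List Char)) × List Char) (line : List Char) :
    PySem.Dict (List Char) (List (List Char)) × List Char :=
  let i := PySem.Chars.find line [':']
  if 0 ≤ i then
    let now := PySem.List.slice line (some 0) (some i)
    let text := PySem.List.slice line (some (i + 1)) none
    let r := if st.1.contains now then st.1 else st.1.insert now []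
    (r.insert now (r.getD now [] ++ [PySem.Chars.strip text]), now)
  else if PySem.Chars.strip line = [] then
    (st.1, "other".toList)
  else
    let r := if st.1.contains st.2 then st.1 else st.1.insert st.2 []
    (r.insert st.2 (r.getD st.2 [] ++ [PySem.Chars.strip line]), st.2)

def split_note_to_paragraph (note : String) : List (String × String) :=
  let fin := (PySem.Chars.splitOn note.toList ['\n']).foldl pvAStep (PySem.Dict.empty, "other".toList)
  -- final loop: for paragraph in result: result[paragraph] = " ".join(result[paragraph])
  fin.1.items.map (fun p => (String.ofList p.1, String.ofList (PySem.Chars.join [' '] p.2)))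

-- ===== PORT B =====
-- Source B take_content: longest prefix of plain content lines (no colon, not blank), stripped, plus rest
def pvTakeContent : List (List Char) → List (List Char) × List (List Char)
  | [] => ([], [])
  | l :: rest =>
    if PySem.Chars.find l [':'] < 0 ∧ PySem.Chars.strip l ≠ [] then
      let p := pvTakeContent rest
      (PySem.Chars.strip l :: p.1, p.2)
    else ([], l :: rest)

lemma pvTakeContent_len (ls : List (List Char)) : (pvTakeContent ls).2.length ≤ ls.length := by
  induction ls with
  | nil => simp [pvTakeContent]
  | cons l rest ih =>
    simp only [pvTakeContent]
    split_ifs with h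
    · exact Nat.le_succ_of_le ih
    · exact Nat.le_refl _

-- Source B segments: cut the line list into (key, texts) runs
def pvSegments : List (List Char) → List (List Char × List (List Char))
  | [] => []
  | line :: rest =>
    let i := PySem.Chars.find line [':']
    if 0 ≤ i then
      let p := pvTakeContent rest
      (PySem.List.slice line (some 0) (some i),
        PySem.Chars.strip (PySem.List.slice line (some (i + 1)) none) :: p.1) :: pvSegments p.2
    else if PySem.Chars.strip line ≠ [] then
      let p := pvTakeContent rest
      ("other".toList, PySem.Chars.strip line :: p.1) :: pvSegments p.2
    else pvSegments rest
termination_by ls => ls.length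
decreasing_by
  · exact Nat.lt_succ_of_le (pvTakeContent_len rest)
  · exact Nat.lt_succ_of_le (pvTakeContent_len rest)
  · exact Nat.lt_succ_of_le (Nat.le_refl _)

-- Source B merge loop body: join a segment's texts and append to / create its key's entry
def pvMerge (d : PySem.Dict (List Char) (List Char)) (seg : List Char × List (List Char)) :
    PySem.Dict (List Char) (List Char) :=
  let joined := PySem.Chars.join [' '] seg.2
  if d.contains seg.1 then d.insert seg.1 (d.getD seg.1 [] ++ ' ' :: joined)
  else d.insert seg.1 joined

def split_note_to_paragraph_alt (note : String) : List (String × String) :=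
  let segs := pvSegments (PySem.Chars.splitOn note.toList ['\n'])
  (segs.foldl pvMerge PySem.Dict.empty).items.map (fun p => (String.ofList p.1, String.ofList p.2))

-- ===== PRECONDITION & SPEC =====
def Spec_split_note_to_paragraph (note : String) (out : List (String × String)) : Prop := out = split_note_to_paragraph_alt note
instance (note : String) (out : List (String × String)) : Decidable (Spec_split_note_to_paragraph note out) := by unfold Spec_split_note_to_paragraph; infer_instance

-- ===== CLAIM (what is proved, stated in full; the proofs are below) =====
def Claim_equal_split_note_to_paragraph : Prop := ∀ (note : String), Dom_split_note_to_paragraph note → Spec_split_note_to_paragraph note (split_note_to_paragraph note)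

-- ===== LEMMAS AND PROOFS =====

-- the (key, stripped text) pairs A's loop appends, in order, as a structural recursion
def pvCollect : List (List Char) → List Char → List (List Char × List Char)
  | [], _ => []
  | line :: rest, now =>
    let i := PySem.Chars.find line [':']
    if 0 ≤ i then
      let k := PySem.List.slice line (some 0) (some i)
      (k, PySem.Chars.strip (PySem.List.slice line (some (i + 1)) none)) :: pvCollect rest k
    else if PySem.Chars.strip line = [] then pvCollect rest ("other".toList)
    else (now, PySem.Chars.strip line) :: pvCollect rest now

-- one tagged pair aggregated into a string-valued dict
def pvBAgg (d : PySem.Dict (List Char) (List Char)) (p : List Char × List Char) :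
    PySem.Dict (List Char) (List Char) :=
  if d.contains p.1 then d.insert p.1 (d.getD p.1 [] ++ ' ' :: p.2) else d.insert p.1 p.2

-- value-wise join of A's dict of lists
def pvMapJoin (d : PySem.Dict (List Char) (List (List Char))) : PySem.Dict (List Char) (List Char) :=
  PySem.Dict.mk (d.items.map fun p => (p.1, PySem.Chars.join [' '] p.2))

lemma contains_pvMapJoin (d : PySem.Dict (List Char) (List (List Char))) (k : List Char) :
    (pvMapJoin d).contains k = d.contains k := by
  cases d with
  | mk l =>
    simp only [pvMapJoin, PySem.Dict.contains_mk, List.any_map]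
    rfl

lemma get?_pvMapJoin (d : PySem.Dict (List Char) (List (List Char))) (k : List Char) :
    (pvMapJoin d).get? k = (d.get? k).map (PySem.Chars.join [' ']) := by
  cases d with
  | mk l =>
    induction l with
    | nil => rfl
    | cons p rest ih =>
      obtain ⟨k1, v1⟩ := p
      simp only [pvMapJoin, List.map_cons, PySem.Dict.get?_mk_cons] at *
      split_ifs with h <;> simp [ih]

lemma pvMapJoin_insert (d : PySem.Dict (List Char) (List (List Char))) (k : List Char)
    (v : List (List Char)) :
    pvMapJoin (d.insert k v) = (pvMapJoin d).insert k (PySem.Chars.join [' '] v) := by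
  apply PySem.Dict.ext
  show (d.insert k v).items.map _ = ((pvMapJoin d).insert k _).items
  rw [PySem.Dict.items_insert, PySem.Dict.items_insert, contains_pvMapJoin]
  by_cases hc : d.contains k
  · simp only [hc, if_true, pvMapJoin, List.map_map]
    apply List.map_congr_left
    intro p _
    by_cases h : p.1 == k <;> simp [h, Function.comp]
  · simp [hc, pvMapJoin]

lemma pvJoin_append_singleton (l : List (List Char)) (t : List Char) (h : l ≠ []) :
    PySem.Chars.join [' '] (l ++ [t]) = PySem.Chars.join [' '] l ++ ' ' :: t := by
  induction l with
  | nil => exact absurd rfl h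
  | cons a rest ih =>
    cases rest with
    | nil => simp [PySem.Chars.join_cons_cons, PySem.Chars.join_singleton]
    | cons b rest' =>
      have : (a :: b :: rest') ++ [t] = a :: ((b :: rest') ++ [t]) := rfl
      rw [this]
      have hcons : (b :: rest') ++ [t] = b :: (rest' ++ [t]) := rfl
      rw [hcons, PySem.Chars.join_cons_cons, ← hcons, ih (by simp), PySem.Chars.join_cons_cons]
      simp [List.append_assoc]

-- A's not-yet-present branch normalises to a single insert
lemma pvA_fresh (d : PySem.Dict (List Char) (List (List Char))) (k t : List Char) :
    (d.insert k []).insert k ((d.insert k []).getD k [] ++ [t]) = d.insert k [t] := by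
  rw [PySem.Dict.getD_insert_self, PySem.Dict.insert_insert_self, List.nil_append]

-- core commutation: one pvBAgg step tracks one A dict update through pvMapJoin
lemma pvStep_commute (d : PySem.Dict (List Char) (List (List Char))) (k t : List Char)
    (h : ∀ p ∈ d.items, p.2 ≠ []) :
    pvBAgg (pvMapJoin d) (k, t) =
      pvMapJoin ((if d.contains k then d else d.insert k []).insert k
        ((if d.contains k then d else d.insert k []).getD k [] ++ [t])) := by
  by_cases hc : d.contains k
  · obtain ⟨l, hl⟩ : ∃ l, d.get? k = some l := by
      rw [PySem.Dict.contains_eq_isSome_get?] at hc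
      exact Option.isSome_iff_exists.mp hc
    have hne : l ≠ [] := h (k, l) (PySem.Dict.mem_items_of_get?_eq_some d hl)
    simp only [hc, if_true, pvMapJoin_insert]
    simp [pvBAgg, contains_pvMapJoin, hc, PySem.Dict.getD_eq_get?_getD, get?_pvMapJoin, hl,
      pvJoin_append_singleton l t hne]
  · simp only [hc, if_false, Bool.false_eq_true, pvA_fresh, pvMapJoin_insert,
      PySem.Chars.join_singleton]
    simp [pvBAgg, contains_pvMapJoin, hc]

-- A's dict never holds an empty list as a value
lemma pvInv_step (d : PySem.Dict (List Char) (List (List Char))) (k t : List Char)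
    (h : ∀ p ∈ d.items, p.2 ≠ []) :
    ∀ p ∈ ((if d.contains k then d else d.insert k []).insert k
        ((if d.contains k then d else d.insert k []).getD k [] ++ [t])).items, p.2 ≠ [] := by
  by_cases hc : d.contains k
  · simp only [hc, if_true]
    intro p hp
    rcases (PySem.Dict.mem_items_insert d k _ p).mp hp with h1 | ⟨h2, _⟩
    · subst h1; simp
    · exact h p h2
  · simp only [hc, if_false, Bool.false_eq_true, pvA_fresh]
    intro p hp
    rcases (PySem.Dict.mem_items_insert d k _ p).mp hp with h1 | ⟨h2, _⟩
    · subst h1; simp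
    · exact h p h2

-- A's fold, seen through pvMapJoin, is pvBAgg folded over the tagged pairs
lemma pvMain (lines : List (List Char)) :
    ∀ (d : PySem.Dict (List Char) (List (List Char))) (now : List Char),
    (∀ p ∈ d.items, p.2 ≠ []) →
    (pvCollect lines now).foldl pvBAgg (pvMapJoin d) =
      pvMapJoin ((lines.foldl pvAStep (d, now)).1) := by
  induction lines with
  | nil => intro d now _; rfl
  | cons line rest ih =>
    intro d now h
    by_cases h1 : 0 ≤ PySem.Chars.find line [':']
    · have hstep := pvStep_commute d (PySem.List.slice line (some 0)
        (some (PySem.Chars.find line [':'])))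
        (PySem.Chars.strip (PySem.List.slice line (some (PySem.Chars.find line [':'] + 1)) none)) h
      have hinv := pvInv_step d (PySem.List.slice line (some 0)
        (some (PySem.Chars.find line [':'])))
        (PySem.Chars.strip (PySem.List.slice line (some (PySem.Chars.find line [':'] + 1)) none)) h
      simp only [pvCollect, pvAStep, h1, if_true, List.foldl_cons]
      rw [hstep]
      exact ih _ _ hinv
    · by_cases h2 : PySem.Chars.strip line = []
      · simp only [pvCollect, pvAStep, h1, h2, if_false, List.foldl_cons]
        exact ih _ _ h
      · have hstep := pvStep_commute d now (PySem.Chars.strip line) h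
        have hinv := pvInv_step d now (PySem.Chars.strip line) h
        simp only [pvCollect, pvAStep, h1, h2, if_false, List.foldl_cons]
        rw [hstep]
        exact ih _ _ hinv

-- ---- bridging B's segments to the tagged pairs ----

-- the tagged pairs a segment list denotes
def pvFlat (segs : List (List Char × List (List Char))) : List (List Char × List Char) :=
  segs.flatMap (fun s => s.2.map (fun t => (s.1, t)))

-- texts of a run, flattened with ' ' separators
def pvSep : List (List Char) → List Char
  | [] => []
  | t :: ts => ' ' :: t ++ pvSep ts

lemma pvJoin_eq_sep (t : List Char) (ts : List (List Char)) :
    PySem.Chars.join [' '] (t :: ts) = t ++ pvSep ts := by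
  induction ts generalizing t with
  | nil => simp [PySem.Chars.join_singleton, pvSep]
  | cons u us ih =>
    rw [PySem.Chars.join_cons_cons, ih u]
    simp [pvSep, List.append_assoc]

-- folding pvBAgg over a same-key run, once the key is present
lemma pvAggRun (ts : List (List Char)) :
    ∀ (d : PySem.Dict (List Char) (List Char)) (k v : List Char),
    (ts.map (fun t => (k, t))).foldl pvBAgg (d.insert k v) = d.insert k (v ++ pvSep ts) := by
  induction ts with
  | nil => intro d k v; simp [pvSep]
  | cons t ts ih =>
    intro d k v
    have hstep : pvBAgg (d.insert k v) (k, t) = d.insert k (v ++ ' ' :: t) := by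
      simp [pvBAgg, PySem.Dict.contains_insert_self, PySem.Dict.getD_insert_self,
        PySem.Dict.insert_insert_self]
    simp only [List.map_cons, List.foldl_cons, hstep]
    rw [ih d k (v ++ ' ' :: t)]
    simp [pvSep, List.append_assoc]

-- one segment: pvBAgg over its pairs = one pvMerge step
lemma pvSegStep (d : PySem.Dict (List Char) (List Char)) (k t : List Char)
    (ts : List (List Char)) :
    ((t :: ts).map (fun x => (k, x))).foldl pvBAgg d = pvMerge d (k, t :: ts) := by
  simp only [List.map_cons, List.foldl_cons, pvMerge, pvJoin_eq_sep]
  by_cases hc : d.contains k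
  · simp only [pvBAgg, hc, if_true]
    rw [pvAggRun ts d k (d.getD k [] ++ ' ' :: t)]
    simp [List.append_assoc]
  · simp only [pvBAgg, hc, Bool.false_eq_true, if_false]
    exact pvAggRun ts d k t

lemma pvFlatAgg (segs : List (List Char × List (List Char)))
    (h : ∀ s ∈ segs, s.2 ≠ []) :
    ∀ d, (pvFlat segs).foldl pvBAgg d = segs.foldl pvMerge d := by
  induction segs with
  | nil => intro d; rfl
  | cons s rest ih =>
    intro d
    obtain ⟨k, ts⟩ := s
    obtain ⟨t, tl, rfl⟩ : ∃ t tl, ts = t :: tl := by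
      cases ts with
      | nil => exact absurd rfl (h (k, []) (List.mem_cons_self ..))
      | cons t tl => exact ⟨t, tl, rfl⟩
    simp only [pvFlat, List.flatMap_cons, List.foldl_append, List.foldl_cons]
    rw [pvSegStep]
    exact ih (fun s hs => h s (List.mem_cons_of_mem _ hs)) _

lemma pvSegments_nonempty_aux (n : Nat) :
    ∀ ls : List (List Char), ls.length ≤ n → ∀ s ∈ pvSegments ls, s.2 ≠ [] := by
  induction n with
  | zero =>
    intro ls hlen s hs
    rw [List.length_eq_zero_iff.mp (Nat.le_zero.mp hlen)] at hs
    rw [pvSegments] at hs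
    cases hs
  | succ n ih =>
    intro ls hlen s hs
    cases ls with
    | nil => rw [pvSegments] at hs; cases hs
    | cons l rest =>
      rw [pvSegments] at hs
      have hr : rest.length ≤ n := Nat.le_of_succ_le_succ hlen
      have ht : (pvTakeContent rest).2.length ≤ n := le_trans (pvTakeContent_len rest) hr
      split_ifs at hs with h1 h2
      · rcases List.mem_cons.mp hs with h | h
        · subst h; simp
        · exact ih _ ht s h
      · rcases List.mem_cons.mp hs with h | h
        · subst h; simp
        · exact ih _ ht s h
      · exact ih _ hr s hs

lemma pvSegments_nonempty (ls : List (List Char)) : ∀ s ∈ pvSegments ls, s.2 ≠ [] :=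
  pvSegments_nonempty_aux ls.length ls (Nat.le_refl _)

lemma pvSegFlat_other (ls : List (List Char)) :
    pvFlat (pvSegments ls) =
      (pvTakeContent ls).1.map (fun t => ("other".toList, t)) ++
        pvFlat (pvSegments (pvTakeContent ls).2) := by
  cases ls with
  | nil => rw [pvTakeContent]; simp
  | cons l rest =>
    rw [pvTakeContent]
    split_ifs with h
    · have h1 : ¬ 0 ≤ PySem.Chars.find l [':'] := by
        have := h.1; omega
      rw [pvSegments, if_neg h1, if_pos h.2]
      simp [pvFlat]
    · simp

lemma pvBridge (ls : List (List Char)) :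
    ∀ now, pvCollect ls now =
      (pvTakeContent ls).1.map (fun t => (now, t)) ++
        pvFlat (pvSegments (pvTakeContent ls).2) := by
  induction ls with
  | nil => intro now; rw [pvTakeContent]; simp [pvCollect, pvSegments, pvFlat]
  | cons l rest ih =>
    intro now
    by_cases hh : 0 ≤ PySem.Chars.find l [':']
    · have hc : ¬ (PySem.Chars.find l [':'] < 0 ∧ PySem.Chars.strip l ≠ []) := by
        intro h; omega
      rw [pvCollect, pvTakeContent, if_neg hc, if_pos hh]
      rw [pvSegments, if_pos hh]
      simp only [List.map_nil, List.nil_append, pvFlat, List.flatMap_cons, List.map_cons]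
      rw [ih]
      rfl
    · by_cases hb : PySem.Chars.strip l = []
      · have hc : ¬ (PySem.Chars.find l [':'] < 0 ∧ PySem.Chars.strip l ≠ []) := by
          intro h; exact h.2 hb
        rw [pvCollect, pvTakeContent, if_neg hc, if_neg hh, if_pos hb]
        rw [pvSegments, if_neg hh, if_neg (by simp [hb])]
        rw [ih, ← pvSegFlat_other rest]
        simp
      · have hc : PySem.Chars.find l [':'] < 0 ∧ PySem.Chars.strip l ≠ [] := ⟨by omega, hb⟩
        rw [pvCollect, pvTakeContent, if_pos hc, if_neg hh, if_neg hb]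
        rw [ih]
        rfl

lemma pvCollect_eq_flat (ls : List (List Char)) :
    pvCollect ls "other".toList = pvFlat (pvSegments ls) := by
  rw [pvBridge ls "other".toList, ← pvSegFlat_other ls]

-- ===== VERDICT (by name: the statement is the Claim_ definition above) =====
theorem split_note_to_paragraph_spec : Claim_equal_split_note_to_paragraph := by
  intro note _
  show (((PySem.Chars.splitOn note.toList ['\n']).foldl pvAStep
      (PySem.Dict.empty, "other".toList)).1.items.map
      (fun p => (String.ofList p.1, String.ofList (PySem.Chars.join [' '] p.2)))) =
    (((pvSegments (PySem.Chars.splitOn note.toList ['\n'])).foldl pvMerge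
      PySem.Dict.empty).items.map (fun p => (String.ofList p.1, String.ofList p.2)))
  have hmain := pvMain (PySem.Chars.splitOn note.toList ['\n']) PySem.Dict.empty "other".toList
    (by intro p hp; cases hp)
  rw [← pvFlatAgg _ (pvSegments_nonempty _), ← pvCollect_eq_flat]
  rw [show (PySem.Dict.empty : PySem.Dict (List Char) (List Char)) =
    pvMapJoin PySem.Dict.empty from rfl, hmain]
  simp only [pvMapJoin, List.map_map]
  rfl
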